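-- pv_equiv track=rewrite | github.com/vallmeister/Programming | src/leetcode/2017_grid_game.py | gridGame
-- ===== SOURCE A (Python) =====
-- from typing import List
--
-- def gridGame(grid: List[List[int]]) -> int:
--     n = len(grid[0])
--     upper_ps = [0] * n
--     lower_ps = [0] * n
--     upper_ps[0] = grid[0][0]
--     lower_ps[0] = grid[1][0]
--     for i in range(n):
--         upper_ps[i] = upper_ps[i - 1] + grid[0][i]
--         lower_ps[i] = lower_ps[i - 1] + grid[1][i]
--     ans = upper_ps[-1] - upper_ps[0]
--     for i in range(1, n):
--         ans = min(ans, max(upper_ps[-1] - upper_ps[i], lower_ps[i - 1]))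
--     return ans
-- ===== SOURCE B (Python) =====
-- def gridGame(grid):
--     top, bottom = grid[0], grid[1]
--     candidates = [sum(top[1:])] + [
--         max(sum(top[i + 1:]), sum(bottom[:i])) for i in range(1, len(top))
--     ]
--     return min(candidates)
-- ===== Notes on version B (the rewrite author's own statement) =====
-- stated objective: alternative
-- what changed: B is the direct brute-force formulation: for every split column it recomputes the top-right and bottom-left totals from scratch with slices and takes min over the candidate list, instead of A's two incrementally built prefix-sum arrays and running-minimum scan; B is stateless but does quadratic recomputation.
import Mathlib
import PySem

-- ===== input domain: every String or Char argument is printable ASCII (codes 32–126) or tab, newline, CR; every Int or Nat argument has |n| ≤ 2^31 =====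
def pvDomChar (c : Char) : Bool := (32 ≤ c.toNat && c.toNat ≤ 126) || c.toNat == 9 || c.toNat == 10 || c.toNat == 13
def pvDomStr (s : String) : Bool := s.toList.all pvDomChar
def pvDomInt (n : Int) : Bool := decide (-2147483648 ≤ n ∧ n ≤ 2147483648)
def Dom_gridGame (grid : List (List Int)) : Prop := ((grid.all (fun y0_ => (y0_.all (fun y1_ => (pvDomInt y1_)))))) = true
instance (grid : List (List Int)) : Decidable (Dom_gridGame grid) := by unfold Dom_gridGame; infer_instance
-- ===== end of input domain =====

-- B replaces A's incrementally built prefix-sum arrays and running-minimum scan by the direct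
-- brute-force formulation: one candidate per split column, each recomputed from scratch with
-- slices, then min over the candidate list (objective: alternative; quadratic recomputation).

-- ===== PORT A =====
-- one body of A's first loop, for one row: u[i] = u[i-1] + row[i]
def pvRowStep (row : List Int) (u : List Int) (i : Int) : List Int :=
  PySem.List.pySetD u i (PySem.List.pyGetD u (i - 1) 0 + PySem.List.pyGetD row i 0)

def gridGame (grid : List (List Int)) : Int :=
  let row0 := PySem.List.pyGetD grid 0 []
  let row1 := PySem.List.pyGetD grid 1 []
  let n := row0.length
  let upper0 := PySem.List.pySetD (List.replicate n (0 : Int)) 0 (PySem.List.pyGetD row0 0 0)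
  let lower0 := PySem.List.pySetD (List.replicate n (0 : Int)) 0 (PySem.List.pyGetD row1 0 0)
  let p := (PySem.List.pyRange 0 (n : Int)).foldl
    (fun (s : List Int × List Int) (i : Int) => (pvRowStep row0 s.1 i, pvRowStep row1 s.2 i))
    (upper0, lower0)
  let ans0 := PySem.List.pyGetD p.1 (-1) 0 - PySem.List.pyGetD p.1 0 0
  (PySem.List.pyRange 1 (n : Int)).foldl
    (fun ans i => min ans (max (PySem.List.pyGetD p.1 (-1) 0 - PySem.List.pyGetD p.1 i 0)
                               (PySem.List.pyGetD p.2 (i - 1) 0)))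
    ans0

-- ===== PORT B =====
def gridGame_alt (grid : List (List Int)) : Int :=
  let top := PySem.List.pyGetD grid 0 []
  let bottom := PySem.List.pyGetD grid 1 []
  let candidates := (PySem.List.slice top (some 1) none).sum ::
    (PySem.List.pyRange 1 (top.length : Int)).map
      (fun i => max (PySem.List.slice top (some (i + 1)) none).sum
                    (PySem.List.slice bottom none (some i)).sum)
  -- Python's min on the (syntactically non-empty) candidate list; the default is unreachable
  (PySem.List.min? candidates (fun y => y)).getD 0

-- ===== PRECONDITION & SPEC =====
-- Pre_ is exactly where the Python A returns: ≥ 2 rows, a non-empty first row, and a second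
-- row at least as long as the first (A indexes grid[1][i] for every i below len(grid[0])).
def Pre_gridGame (grid : List (List Int)) : Prop :=
  2 ≤ grid.length ∧ 1 ≤ (grid.getD 0 []).length ∧ (grid.getD 0 []).length ≤ (grid.getD 1 []).length
instance (grid : List (List Int)) : Decidable (Pre_gridGame grid) := by unfold Pre_gridGame; infer_instance

def pvWitness_gridGame : List (List Int) := [[2, 5, 4], [1, 5, 1]]

def Spec_gridGame (grid : List (List Int)) (out : Int) : Prop := out = gridGame_alt grid
instance (grid : List (List Int)) (out : Int) : Decidable (Spec_gridGame grid out) := by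
  unfold Spec_gridGame; infer_instance

-- ===== CLAIM (what is proved, stated in full; the proofs are below) =====
def Claim_equal_gridGame : Prop :=
  ∀ (grid : List (List Int)), Dom_gridGame grid → Pre_gridGame grid →
    Spec_gridGame grid (gridGame grid)

-- ===== LEMMAS AND PROOFS =====

-- A's array after the first m iterations of its first loop (prefix sums up to column m)
def pvState (r : List Int) (n m : Nat) : List Int :=
  (List.range n).map (fun k => if k < m then (r.take (k + 1)).sum else 0)

theorem pvState_length (r : List Int) (n m : Nat) : (pvState r n m).length = n := by
  simp [pvState]

theorem pvState_getElem (r : List Int) (n m k : Nat) (hk : k < n) :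
    (pvState r n m)[k]'(by simpa [pvState_length] using hk) =
      if k < m then (r.take (k + 1)).sum else 0 := by
  simp [pvState]

theorem pvState_get (r : List Int) (n m k : Nat) (hk : k < n) :
    PySem.List.pyGetD (pvState r n m) (k : Int) 0 =
      if k < m then (r.take (k + 1)).sum else 0 := by
  rw [PySem.List.pyGetD_natCast, List.getD_eq_getElem?_getD,
    List.getElem?_eq_getElem (by simpa [pvState_length] using hk)]
  simp [pvState_getElem r n m k hk]

theorem pvState_set (r : List Int) (n m : Nat) (_hm : m < n) :
    (pvState r n m).set m ((r.take (m + 1)).sum) = pvState r n (m + 1) := by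
  apply List.ext_getElem
  · simp [pvState_length]
  · intro k hk _
    have hkn : k < n := by simpa [pvState_length] using hk
    rw [List.getElem_set]
    by_cases hkm : m = k
    · subst hkm
      rw [pvState_getElem r n (m + 1) m hkn]
      simp
    · rw [if_neg hkm, pvState_getElem r n m k hkn, pvState_getElem r n (m + 1) k hkn]
      split_ifs with h1 h2 <;> first | rfl | omega

theorem pvSetD_zero (xs : List Int) (v : Int) :
    PySem.List.pySetD xs (0 : Int) v = xs.set 0 v := by
  exact_mod_cast PySem.List.pySetD_natCast xs 0 v

theorem pvHead_eq_take_sum (r : List Int) (h : 0 < r.length) :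
    PySem.List.pyGetD r 0 0 = (r.take 1).sum := by
  rw [PySem.List.pyGetD_zero, List.getD_eq_getElem?_getD, List.getElem?_eq_getElem h]
  rw [show (1 : Nat) = 0 + 1 from rfl, List.sum_take_succ r 0 h]
  simp

theorem pvInit_eq (r : List Int) (n : Nat) (hn : 1 ≤ n) (hlen : n ≤ r.length) :
    PySem.List.pySetD (List.replicate n (0 : Int)) 0 (PySem.List.pyGetD r 0 0) =
      pvState r n 1 := by
  rw [pvSetD_zero, pvHead_eq_take_sum r (by omega)]
  apply List.ext_getElem
  · simp [pvState_length]
  · intro k hk _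
    have hkn : k < n := by simpa using hk
    rw [List.getElem_set, pvState_getElem r n 1 k hkn]
    by_cases hk0 : 0 = k
    · subst hk0; simp
    · simp [hk0]; omega

theorem pvRowStep_state (r : List Int) (n : Nat) (hn : 2 ≤ n) (hlen : n ≤ r.length)
    (i : Nat) (hi : i < n) :
    pvRowStep r (pvState r n (max i 1)) (i : Int) = pvState r n (i + 1) := by
  unfold pvRowStep
  have hri : PySem.List.pyGetD r (i : Int) 0 = r[i]'(by omega) := by
    rw [PySem.List.pyGetD_natCast, List.getD_eq_getElem?_getD,
      List.getElem?_eq_getElem (by omega : i < r.length)]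
    simp
  rcases Nat.eq_zero_or_pos i with hi0 | hipos
  · subst hi0
    simp only [Nat.cast_zero]
    rw [show max 0 1 = 1 from rfl]
    have hne : pvState r n 1 ≠ [] := by
      intro h; have := congrArg List.length h; simp [pvState_length] at this; omega
    have hlast : PySem.List.pyGetD (pvState r n 1) ((0 : Int) - 1) 0 = 0 := by
      rw [show ((0 : Int) - 1) = -1 by ring, PySem.List.pyGetD_neg_one _ _ hne,
        List.getLast_eq_getElem]
      rw [pvState_getElem r n 1 ((pvState r n 1).length - 1) (by simp [pvState_length]; omega)]
      simp [pvState_length]; omega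
    rw [hlast, pvSetD_zero] at *
    rw [zero_add, pvHead_eq_take_sum r (by omega)]
    apply List.ext_getElem
    · simp [pvState_length]
    · intro k hk1 hk2
      have hkn : k < n := by simpa [pvState_length] using hk2
      rw [List.getElem_set, pvState_getElem r n (0 + 1) k hkn]
      by_cases h0 : 0 = k
      · subst h0
        simp
      · rw [if_neg h0]
  · have hmax : max i 1 = i := by omega
    rw [hmax]
    have hprev : PySem.List.pyGetD (pvState r n i) ((i : Int) - 1) 0 = (r.take i).sum := by
      rw [show ((i : Int) - 1) = ((i - 1 : Nat) : Int) by omega]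
      rw [pvState_get r n i (i - 1) (by omega)]
      rw [if_pos (by omega), show (i - 1) + 1 = i by omega]
    rw [hprev, hri, PySem.List.pySetD_natCast]
    have : (r.take i).sum + r[i]'(by omega) = (r.take (i + 1)).sum := by
      rw [List.sum_take_succ r i (by omega)]
    rw [this, pvState_set r n i hi]

theorem pvRowLoop (r : List Int) (n : Nat) (hn : 2 ≤ n) (hlen : n ≤ r.length) :
    ∀ (m : Nat), m ≤ n →
      (PySem.List.pyRange 0 (m : Int)).foldl (pvRowStep r)
        (PySem.List.pySetD (List.replicate n (0 : Int)) 0 (PySem.List.pyGetD r 0 0)) =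
      pvState r n (max m 1) := by
  intro m
  induction m with
  | zero =>
    intro _
    rw [show ((0 : Nat) : Int) = 0 from rfl, show PySem.List.pyRange 0 0 = ([] : List Int) by decide,
      List.foldl_nil, pvInit_eq r n (Nat.le_of_succ_le hn) hlen]
    rfl
  | succ m ih =>
    intro hmn
    rw [show ((m + 1 : Nat) : Int) = (m : Int) + 1 by push_cast; ring,
      PySem.List.pyRange_one_succ_right (by omega), List.foldl_append, ih (by omega)]
    simp only [List.foldl_cons, List.foldl_nil]
    rw [show (max (m + 1) 1) = m + 1 by omega]
    exact pvRowStep_state r n hn hlen m (by omega)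

-- sum of a dropped suffix as total minus prefix
theorem pvDrop_sum (r : List Int) (k : Nat) : (r.drop k).sum = r.sum - (r.take k).sum := by
  have h := List.sum_take_add_sum_drop r k
  omega

-- ===== VERDICT (by name: the statement is the Claim_ definition above) =====
theorem gridGame_spec : Claim_equal_gridGame := by
  intro grid _ hpre
  obtain ⟨h2, h1, hle⟩ := hpre
  show gridGame grid = gridGame_alt grid
  simp only [gridGame, gridGame_alt]
  rw [PySem.List.pyGetD_zero grid [], PySem.List.pyGetD_ofNat' grid 1 []]
  set t := grid.getD 0 [] with ht
  set b := grid.getD 1 [] with hb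
  rcases Nat.lt_or_ge t.length 2 with hn1 | hn2
  · -- single-column grid: both sides are 0
    have hlen : t.length = 1 := by omega
    obtain ⟨x, hx⟩ := List.length_eq_one_iff.mp hlen
    rw [hx]
    simp [pvRowStep, PySem.List.pyRange, PySem.List.pySetD, PySem.List.pySet?,
      PySem.List.pyGetD, PySem.List.pyGet?, PySem.List.pyIdx?,
      PySem.List.slice_from_one, PySem.List.min?]
  · -- general case: A's arrays hold the prefix sums; B's slice sums are the same quantities
    set n := t.length with hn
    rw [PySem.List.foldl_prod_mk (pvRowStep t) (pvRowStep b) (PySem.List.pyRange 0 (n : Int)) _ _,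
      pvRowLoop t n hn2 (le_of_eq hn) n le_rfl, pvRowLoop b n hn2 hle n le_rfl,
      show max n 1 = n by omega]
    have hne : pvState t n n ≠ [] := by
      intro h; have := congrArg List.length h; simp [pvState_length] at this; omega
    have hlast : PySem.List.pyGetD (pvState t n n) (-1) 0 = t.sum := by
      rw [PySem.List.pyGetD_neg_one _ _ hne, List.getLast_eq_getElem]
      rw [pvState_getElem t n n ((pvState t n n).length - 1) (by simp [pvState_length]; omega)]
      rw [if_pos (by simp [pvState_length]; omega)]
      rw [show (pvState t n n).length - 1 + 1 = n by simp [pvState_length]; omega]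
      rw [hn, List.take_length]
    have hzero : PySem.List.pyGetD (pvState t n n) 0 0 = (t.take 1).sum := by
      have h := pvState_get t n n 0 (by omega)
      rw [if_pos (by omega)] at h
      exact_mod_cast h
    rw [hlast, hzero]
    -- B's head candidate and min-of-list as a fold
    rw [PySem.List.min?_id_cons, Option.getD_some, PySem.List.slice_from_one,
      ← List.drop_one, List.foldl_map]
    rw [pvDrop_sum t 1]
    refine PySem.List.foldl_congr_mem _ _ _ _ ?_
    intro acc i hi
    rw [PySem.List.mem_pyRange_one] at hi
    have h1i : 1 ≤ i.toNat := by omega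
    have hin : i.toNat < n := by omega
    have hA1 : PySem.List.pyGetD (pvState t n n) i 0 = (t.take (i.toNat + 1)).sum := by
      rw [show i = ((i.toNat : Nat) : Int) by omega, pvState_get t n n i.toNat hin, if_pos hin]
      simp only [Int.toNat_natCast]
    have hA2 : PySem.List.pyGetD (pvState b n n) (i - 1) 0 = (b.take i.toNat).sum := by
      rw [show i - 1 = ((i.toNat - 1 : Nat) : Int) by omega,
        pvState_get b n n (i.toNat - 1) (by omega), if_pos (by omega),
        show i.toNat - 1 + 1 = i.toNat by omega]
    rw [hA1, hA2, PySem.List.slice_from t (show (0:Int) ≤ i + 1 by omega),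
      PySem.List.slice_to b (show (0:Int) ≤ i by omega),
      show (i + 1).toNat = i.toNat + 1 by omega, pvDrop_sum t (i.toNat + 1)]
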